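-- pv_equiv track=rewrite | github.com/ZAP-FYP/YOLOPv2-1D_Coordinates | utils/utils.py | remove_bottom_edge
-- ===== SOURCE A (Python) =====
-- def remove_bottom_edge(polygon_coords):
--     max_y_values = {}
--     for x, y in polygon_coords:
--         if x in max_y_values:
--             max_y_values[x] = max(max_y_values[x], y)
--         else:
--             max_y_values[x] = y
--
--     # Filter out points with minimum Y value for each X value
--     filtered_polygon_coords = [(x, y) for x, y in polygon_coords if y == max_y_values[x]]
--     return filtered_polygon_coords
-- ===== SOURCE B (Python) =====
-- def remove_bottom_edge(polygon_coords):
--     return [(x, y) for x, y in polygon_coords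
--             if all(y >= y2 for x2, y2 in polygon_coords if x2 == x)]
-- ===== Notes on version B (the rewrite author's own statement) =====
-- stated objective: simpler
-- what changed: Replaces the build-a-max-per-x-dictionary pass plus lookup-filter with a single list comprehension that keeps a point iff no point with the same x has a strictly greater y (no auxiliary structure).
import Mathlib
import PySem

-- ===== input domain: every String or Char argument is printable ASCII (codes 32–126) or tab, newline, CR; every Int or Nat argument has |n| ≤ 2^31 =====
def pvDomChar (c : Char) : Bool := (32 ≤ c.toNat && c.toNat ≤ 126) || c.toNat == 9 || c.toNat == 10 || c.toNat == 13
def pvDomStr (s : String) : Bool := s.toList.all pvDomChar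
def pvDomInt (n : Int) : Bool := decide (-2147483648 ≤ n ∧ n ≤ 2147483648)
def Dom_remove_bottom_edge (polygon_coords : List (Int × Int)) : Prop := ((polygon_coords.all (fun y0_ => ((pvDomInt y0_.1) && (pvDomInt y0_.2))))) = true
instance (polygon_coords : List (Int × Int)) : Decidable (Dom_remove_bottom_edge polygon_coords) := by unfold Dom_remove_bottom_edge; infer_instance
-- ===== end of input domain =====

-- B replaces A's max-per-x dictionary pass with a single comprehension keeping points no same-x point strictly beats; objective: simpler.

-- ===== PORT A =====
-- the dict-building loop: 'if x in max_y_values: … max(…) else: …'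
def rbeStep (d : PySem.Dict Int Int) (p : Int × Int) : PySem.Dict Int Int :=
  match d.get? p.1 with
  | some v => d.insert p.1 (max v p.2)
  | none   => d.insert p.1 p.2

def remove_bottom_edge (polygon_coords : List (Int × Int)) : List (Int × Int) :=
  let max_y_values := polygon_coords.foldl rbeStep PySem.Dict.empty
  polygon_coords.filter (fun p => max_y_values.get? p.1 == some p.2)

-- ===== PORT B =====
def remove_bottom_edge_alt (polygon_coords : List (Int × Int)) : List (Int × Int) :=
  polygon_coords.filter (fun p =>
    polygon_coords.all (fun q => !(q.1 == p.1) || decide (p.2 ≥ q.2)))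

-- ===== PRECONDITION & SPEC =====
def Spec_remove_bottom_edge (polygon_coords : List (Int × Int)) (out : List (Int × Int)) : Prop := out = remove_bottom_edge_alt polygon_coords
instance (polygon_coords : List (Int × Int)) (out : List (Int × Int)) : Decidable (Spec_remove_bottom_edge polygon_coords out) := by unfold Spec_remove_bottom_edge; infer_instance

-- ===== CLAIM (what is proved, stated in full; the proofs are below) =====
def Claim_equal_remove_bottom_edge : Prop := ∀ (polygon_coords : List (Int × Int)), Dom_remove_bottom_edge polygon_coords → Spec_remove_bottom_edge polygon_coords (remove_bottom_edge polygon_coords)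

-- ===== LEMMAS AND PROOFS =====

-- abstract form of what the dict stores at key x after folding pc, starting from accumulator o
def maxAcc (x : Int) (pc : List (Int × Int)) (o : Option Int) : Option Int :=
  pc.foldl (fun acc q => if q.1 = x then
      some (match acc with | none => q.2 | some v => max v q.2) else acc) o

theorem get_fold (pc : List (Int × Int)) (d : PySem.Dict Int Int) (x : Int) :
    (pc.foldl rbeStep d).get? x = maxAcc x pc (d.get? x) := by
  induction pc generalizing d with
  | nil => simp [maxAcc]
  | cons p pc ih =>
    simp only [List.foldl_cons, maxAcc, ih]
    congr 1
    unfold rbeStep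
    cases h : d.get? p.1 with
    | none => rw [PySem.Dict.get?_insert]; by_cases hx : p.1 = x
              · subst hx; simp [h]
              · rw [if_neg (fun h => hx h.symm), if_neg hx]
    | some v => rw [PySem.Dict.get?_insert]; by_cases hx : p.1 = x
                · subst hx; simp [h]
                · rw [if_neg (fun h => hx h.symm), if_neg hx]

theorem maxAcc_mono (pc : List (Int × Int)) (x v m : Int)
    (h : maxAcc x pc (some v) = some m) : v ≤ m := by
  induction pc generalizing v with
  | nil => simp [maxAcc] at h; omega
  | cons q pc ih =>
    simp only [maxAcc, List.foldl_cons] at h ih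
    by_cases hq : q.1 = x
    · simp only [hq, if_pos rfl] at h
      have := ih (max v q.2) h
      omega
    · simp only [if_neg hq] at h
      exact ih v h

theorem maxAcc_ub (pc : List (Int × Int)) (x : Int) (o : Option Int) (m : Int)
    (h : maxAcc x pc o = some m) :
    ∀ q ∈ pc, q.1 = x → q.2 ≤ m := by
  induction pc generalizing o with
  | nil => simp
  | cons p pc ih =>
    intro q hq hqx
    simp only [maxAcc, List.foldl_cons] at h
    rcases List.mem_cons.mp hq with hq | hq
    · subst hq
      simp only [hqx, if_pos rfl] at h
      cases o with
      | none => exact maxAcc_mono pc x _ _ h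
      | some v => have := maxAcc_mono pc x _ _ h; simp at this ⊢; omega
    · by_cases hp : p.1 = x
      · simp only [hp, if_pos rfl] at h
        exact ih _ h q hq hqx
      · simp only [if_neg hp] at h
        exact ih _ h q hq hqx

theorem maxAcc_mem (pc : List (Int × Int)) (x : Int) (o : Option Int) (m : Int)
    (h : maxAcc x pc o = some m) :
    o = some m ∨ ∃ q ∈ pc, q.1 = x ∧ q.2 = m := by
  induction pc generalizing o with
  | nil => simp [maxAcc] at h; simp [h]
  | cons p pc ih =>
    simp only [maxAcc, List.foldl_cons] at h
    by_cases hp : p.1 = x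
    · simp only [hp, if_pos rfl] at h
      rcases ih _ h with h' | ⟨q, hq, hqx, hqm⟩
      · cases o with
        | none =>
          simp at h'
          right; exact ⟨p, by simp, hp, h'⟩
        | some v =>
          simp at h'
          rcases max_choice v p.2 with hc | hc
          · left; rw [hc] at h'; rw [h']
          · right; exact ⟨p, by simp, hp, by rw [← h', hc]⟩
      · right; exact ⟨q, by simp [hq], hqx, hqm⟩
    · simp only [if_neg hp] at h
      rcases ih _ h with h' | ⟨q, hq, hqx, hqm⟩
      · left; exact h'
      · right; exact ⟨q, by simp [hq], hqx, hqm⟩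

theorem maxAcc_isSome (pc : List (Int × Int)) (x : Int) (o : Option Int)
    (hmem : (∃ q ∈ pc, q.1 = x) ∨ o.isSome) : (maxAcc x pc o).isSome := by
  induction pc generalizing o with
  | nil =>
    rcases hmem with h | h
    · simp at h
    · simpa [maxAcc] using h
  | cons p pc ih =>
    simp only [maxAcc, List.foldl_cons]
    by_cases hp : p.1 = x
    · simp only [hp, if_pos rfl]
      exact ih _ (Or.inr (by cases o <;> simp))
    · simp only [if_neg hp]
      apply ih
      rcases hmem with ⟨q, hq, hqx⟩ | h
      · rcases List.mem_cons.mp hq with hq | hq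
        · subst hq; exact absurd hqx hp
        · exact Or.inl ⟨q, hq, hqx⟩
      · exact Or.inr h

-- ===== VERDICT (by name: the statement is the Claim_ definition above) =====
theorem remove_bottom_edge_spec : Claim_equal_remove_bottom_edge := by
  intro pc _
  unfold Spec_remove_bottom_edge remove_bottom_edge remove_bottom_edge_alt
  apply List.filter_congr
  intro p hp
  rw [get_fold]
  have hsome : (maxAcc p.1 pc (PySem.Dict.empty.get? p.1)).isSome :=
    maxAcc_isSome pc p.1 _ (Or.inl ⟨p, hp, rfl⟩)
  obtain ⟨m, hm⟩ := Option.isSome_iff_exists.mp hsome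
  rw [hm]
  rw [Bool.eq_iff_iff]
  simp only [beq_iff_eq, Option.some.injEq, List.all_eq_true, Bool.or_eq_true,
    Bool.not_eq_true', beq_eq_false_iff_ne, ne_eq, decide_eq_true_eq]
  constructor
  · intro hmy q hq
    by_cases hqx : q.1 = p.1
    · right; rw [← hmy]; exact maxAcc_ub pc p.1 _ m hm q hq hqx
    · left; exact hqx
  · intro hall
    have hle : p.2 ≤ m := maxAcc_ub pc p.1 _ m hm p hp rfl
    rcases maxAcc_mem pc p.1 _ m hm with h' | ⟨q, hq, hqx, hqm⟩
    · simp [PySem.Dict.get?] at h'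
      exact absurd h' (by simp [PySem.Dict.empty])
    · rcases hall q hq with h | h
      · exact absurd hqx h
      · omega
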